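-- pv_equiv track=rewrite | github.com/0Zhansultan/cryptographie | finale1.py | read_columns
-- ===== SOURCE A (Python) =====
-- def read_columns(lists):
--     if not lists:
--         return []
--
--     max_length = max(len(lst) for lst in lists)
--     columns = []
--
--     for col in range(max_length):
--         for row in lists:
--             if col < len(row):
--                 columns.append(row[col])
--
--     return columns
-- ===== SOURCE B (Python) =====
-- def read_columns(lists):
--     # One pass over the elements: bucket each by its column index, then concatenate buckets.
--     buckets = []
--     for row in lists:
--         for i, x in enumerate(row):
--             if i == len(buckets):
--                 buckets.append([x])
--             else:
--                 buckets[i].append(x)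
--     out = []
--     for b in buckets:
--         out += b
--     return out
-- ===== Notes on version B (the rewrite author's own statement) =====
-- stated objective: alternative
-- what changed: Replaces the column-by-column rescans of all rows (one full pass over the rows per column index) with a single pass that buckets each element by its column index and then concatenates the buckets.
import Mathlib
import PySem

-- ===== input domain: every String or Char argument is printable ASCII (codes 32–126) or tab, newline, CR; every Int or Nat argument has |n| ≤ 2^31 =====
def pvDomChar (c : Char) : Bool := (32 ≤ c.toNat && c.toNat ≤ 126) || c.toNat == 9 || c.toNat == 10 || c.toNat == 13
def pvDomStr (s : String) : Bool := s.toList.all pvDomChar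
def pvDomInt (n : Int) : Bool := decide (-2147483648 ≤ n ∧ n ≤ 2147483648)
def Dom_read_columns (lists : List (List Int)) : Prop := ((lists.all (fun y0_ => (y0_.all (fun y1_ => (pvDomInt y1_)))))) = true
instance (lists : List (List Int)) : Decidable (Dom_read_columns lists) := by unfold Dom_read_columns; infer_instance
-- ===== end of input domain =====

-- B replaces A's max_length column-wise passes over the rows by one bucketing pass over the elements.

-- ===== PORT A =====
def read_columns (lists : List (List Int)) : List Int :=
  if lists = [] then []
  else
    (PySem.List.pyRange 0 (((lists.map (fun lst => (lst.length : Int))).max?).getD 0) 1).foldl (fun columns col =>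
      lists.foldl (fun columns row =>
        if col < (row.length : Int) then columns ++ [PySem.List.pyGetD row col 0] else columns)
        columns) []

-- ===== PORT B =====
-- buckets[i].append(x) / buckets.append([x]); i from enumerate is always 0 ≤ i ≤ len(buckets), so .toNat is exact here
def pvAddElem (buckets : List (List Int)) (i : Int) (x : Int) : List (List Int) :=
  if i = (buckets.length : Int) then buckets ++ [[x]]
  else buckets.modify i.toNat (fun b => b ++ [x])

def read_columns_alt (lists : List (List Int)) : List Int :=
  let buckets := lists.foldl (fun bs row =>
    (PySem.List.enumerate row 0).foldl (fun bs p => pvAddElem bs p.1 p.2) bs) []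
  buckets.foldl (fun out b => out ++ b) []

-- ===== PRECONDITION & SPEC =====
def Spec_read_columns (lists : List (List Int)) (out : List Int) : Prop := out = read_columns_alt lists
instance (lists : List (List Int)) (out : List Int) : Decidable (Spec_read_columns lists out) := by unfold Spec_read_columns; infer_instance

-- ===== CLAIM (what is proved, stated in full; the proofs are below) =====
def Claim_equal_read_columns : Prop := ∀ (lists : List (List Int)), Dom_read_columns lists → Spec_read_columns lists (read_columns lists)

-- ===== LEMMAS AND PROOFS =====

-- the content of column k
def pvCols (lists : List (List Int)) (k : Nat) : List Int :=
  lists.filterMap (fun r => r[k]?)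

-- merging one row into the bucket list, positionally
def pvMerge : List (List Int) → List Int → List (List Int)
  | bs, [] => bs
  | [], x :: xs => [x] :: pvMerge [] xs
  | b :: bs, x :: xs => (b ++ [x]) :: pvMerge bs xs

theorem pvMerge_getD (bs : List (List Int)) (row : List Int) (k : Nat) :
    (pvMerge bs row).getD k [] = bs.getD k [] ++ (row[k]?.elim [] (fun x => [x])) := by
  induction bs generalizing row k with
  | nil =>
    induction row generalizing k with
    | nil => simp [pvMerge]
    | cons x xs ih =>
      cases k with
      | zero => simp [pvMerge]
      | succ k => simpa [pvMerge] using ih k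
  | cons b bs ih =>
    cases row with
    | nil => simp [pvMerge]
    | cons x xs =>
      cases k with
      | zero => simp [pvMerge]
      | succ k => simpa [pvMerge] using ih xs k

theorem pvMerge_length (bs : List (List Int)) (row : List Int) :
    (pvMerge bs row).length = max bs.length row.length := by
  induction bs generalizing row with
  | nil =>
    induction row with
    | nil => simp [pvMerge]
    | cons x xs ih => simp [pvMerge] at ih ⊢; omega
  | cons b bs ih =>
    cases row with
    | nil => simp [pvMerge]
    | cons x xs => simp [pvMerge, ih]

-- the inner enumerate-fold of B is pvMerge, positionally shifted by a prefix
theorem pvFold_enum (row : List Int) (pre bs : List (List Int)) :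
    (PySem.List.enumerate row (pre.length : Int)).foldl (fun t p => pvAddElem t p.1 p.2) (pre ++ bs)
      = pre ++ pvMerge bs row := by
  induction row generalizing pre bs with
  | nil => simp [PySem.List.enumerate_nil]; cases bs <;> rfl
  | cons x xs ih =>
    rw [PySem.List.enumerate_cons]
    cases bs with
    | nil =>
      have hstep : pvAddElem (pre ++ []) (pre.length : Int) x = pre ++ [[x]] := by
        simp [pvAddElem]
      have := ih (pre ++ [[x]]) []
      simp only [List.foldl_cons, hstep]
      simp only [List.length_append, List.length_cons, List.length_nil] at this
      rw [show ((pre.length : Int) + 1) = (((pre.length + (0+1)) : Nat) : Int) by push_cast; ring]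
      rw [show pre ++ [[x]] = (pre ++ [[x]]) ++ [] by simp] 
      rw [this]
      simp [pvMerge]
    | cons b bs' =>
      have hne : (pre.length : Int) ≠ ((pre ++ b :: bs').length : Int) := by
        simp; omega
      have hstep : pvAddElem (pre ++ b :: bs') (pre.length : Int) x
          = (pre ++ [b ++ [x]]) ++ bs' := by
        simp only [pvAddElem, if_neg hne, Int.toNat_natCast]
        rw [List.modify_eq_take_drop]
        · simp [List.modifyHead]
      have := ih (pre ++ [b ++ [x]]) bs'
      simp only [List.foldl_cons, hstep]
      rw [show ((pre.length : Int) + 1) = (((pre ++ [b ++ [x]]).length : Nat) : Int) by simp]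
      rw [this]
      simp [pvMerge]

-- the bucket accumulation over all rows
theorem pvFold_rows_getD (lists : List (List Int)) (bs : List (List Int)) (k : Nat) :
    (lists.foldl pvMerge bs).getD k []
      = bs.getD k [] ++ pvCols lists k := by
  induction lists generalizing bs with
  | nil => simp [pvCols]
  | cons r rs ih =>
    simp only [List.foldl_cons, ih, pvMerge_getD]
    unfold pvCols
    cases h : r[k]? <;> simp [h]

theorem pvFold_rows_length (lists : List (List Int)) (bs : List (List Int)) :
    (lists.foldl pvMerge bs).length
      = lists.foldl (fun a r => max a r.length) bs.length := by
  induction lists generalizing bs with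
  | nil => rfl
  | cons r rs ih => simp [List.foldl_cons, ih, pvMerge_length]

-- flatten as an index sweep
theorem flatten_eq_range (l : List (List Int)) :
    l.flatten = (List.range l.length).flatMap (fun i => l.getD i []) := by
  induction l with
  | nil => simp
  | cons b bs ih =>
    simp only [List.flatten_cons, List.length_cons, List.range_succ_eq_map,
      List.flatMap_cons, List.flatMap_map]
    simp [ih]

-- per-column equality of A's inner pass with pvCols
theorem colA_eq (lists : List (List Int)) (k : Nat) :
    ((lists.filter (fun r => decide (k < r.length))).map
        (fun r => r.getD k 0))
      = pvCols lists k := by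
  induction lists with
  | nil => rfl
  | cons r rs ih =>
    unfold pvCols at ih ⊢
    by_cases h : k < r.length
    · rw [List.filter_cons_of_pos (by simpa using h), List.map_cons, ih,
        List.filterMap_cons, List.getElem?_eq_getElem h]
      simp [List.getD, List.getElem?_eq_getElem h]
    · rw [List.filter_cons_of_neg (by simpa using h), ih, List.filterMap_cons]
      have : r[k]? = none := by rw [List.getElem?_eq_none_iff]; omega
      simp [this]

-- Int max over mapped lengths vs Nat foldl max
theorem maxFold_cast (xs : List (List Int)) (a : Nat) :
    (xs.map (fun l => (l.length : Int))).foldl max (a : Int)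
      = ((xs.foldl (fun a r => max a r.length) a : Nat) : Int) := by
  induction xs generalizing a with
  | nil => rfl
  | cons r rs ih =>
    simp only [List.map_cons, List.foldl_cons]
    rw [show max (a : Int) (r.length : Int) = ((max a r.length : Nat) : Int) by push_cast; rfl, ih]

-- ===== VERDICT (by name: the statement is the Claim_ definition above) =====
theorem read_columns_spec : Claim_equal_read_columns := by
  intro lists _
  unfold Spec_read_columns read_columns read_columns_alt
  -- rewrite B's body
  have hBfold : (fun (bs : List (List Int)) (row : List Int) =>
      (PySem.List.enumerate row 0).foldl (fun bs p => pvAddElem bs p.1 p.2) bs) = pvMerge := by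
    funext bs row
    simpa using pvFold_enum row [] bs
  rw [hBfold, PySem.List.foldl_append_eq_flatten, List.nil_append,
    flatten_eq_range (lists.foldl pvMerge [])]
  rw [pvFold_rows_length]
  simp only [List.length_nil]
  set Mn : Nat := lists.foldl (fun a r => max a r.length) 0 with hMn
  have hbucket : ∀ k : Nat, (lists.foldl pvMerge ([] : List (List Int))).getD k [] = pvCols lists k := by
    intro k; simpa using pvFold_rows_getD lists [] k
  by_cases hnil : lists = []
  · subst hnil; rfl
  · rw [if_neg hnil]
    -- A's max_length equals Mn
    obtain ⟨r, rs, rfl⟩ := List.exists_cons_of_ne_nil hnil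
    have hmax : (((r :: rs).map (fun lst => (lst.length : Int))).max?).getD 0 = (Mn : Int) := by
      rw [List.map_cons, List.max?_cons']
      simp only [Option.getD_some]
      have := maxFold_cast rs r.length
      simp only [hMn, List.foldl_cons, Nat.max_comm, Nat.max_zero]
      rw [← this, List.foldl_map]
    rw [hmax, PySem.List.pyRange_one]
    simp only [Int.sub_zero, Int.toNat_natCast]
    have houter : (fun (columns : List Int) (col : Int) =>
        (r :: rs).foldl (fun c row =>
          if col < ((row.length : Nat) : Int) then c ++ [PySem.List.pyGetD row col 0] else c) columns)
        = fun (columns : List Int) (col : Int) =>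
          columns ++ ((r :: rs).filter (fun row => decide (col < ((row.length : Nat) : Int)))).map
            (fun row => PySem.List.pyGetD row col 0) := by
      funext columns col
      exact PySem.List.foldl_append_ite (fun row => col < ((row.length : Nat) : Int))
        (fun row => PySem.List.pyGetD row col 0) (r :: rs) columns
    rw [houter, PySem.List.foldl_append_eq_flatMap, List.nil_append, List.flatMap_map]
    apply List.flatMap_congr
    intro k _
    have hsimp : (fun (row : List Int) => decide (((0:Int) + (k:Int)) < ((row.length : Nat) : Int)))
        = (fun (row : List Int) => decide (k < row.length)) := by
      funext row; simp
    rw [hsimp]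
    have hget : (fun (row : List Int) => PySem.List.pyGetD row ((0:Int) + (k:Int)) 0)
        = (fun (row : List Int) => row.getD k 0) := by
      funext row; simp [PySem.List.pyGetD_natCast]
    rw [hget, colA_eq, hbucket]
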